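-- pv_equiv track=rewrite | github.com/aarestad/advent-of-code | 2025/aoc_2025/day3.py | best_battery_remaining
-- ===== SOURCE A (Python) =====
-- def best_battery_remaining(line, num_batteries_remaining):
--     best_idx = -1
--     best_val = 0
--     substr = line[: len(line) - num_batteries_remaining]
--
--     for idx, b in enumerate(substr):
--         val = int(b)
--
--         if val == 9:
--             return idx
--
--         if val > best_val:
--             best_val = val
--             best_idx = idx
--
--     return best_idx
-- ===== SOURCE B (Python) =====
-- def best_battery_remaining(line, num_batteries_remaining):
--     substr = line[: len(line) - num_batteries_remaining]
--     if not substr: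
--         return -1
--     best = max(substr)
--     if best == '0':
--         return -1
--     return substr.index(best)
-- ===== Notes on version B (the rewrite author's own statement) =====
-- stated objective: simpler
-- what changed: Replaces A's single tracking scan (running best value/index with an early exit on 9) by two standard-library passes over the same sliced prefix: max(substr) and then substr.index(max), with -1 for an empty prefix or an all-zero maximum.
-- outside the precondition, e.g. on best_battery_remaining('9xx1 bc0az09 y1a', 2): A returns 0, B returns 9
import Mathlib
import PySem

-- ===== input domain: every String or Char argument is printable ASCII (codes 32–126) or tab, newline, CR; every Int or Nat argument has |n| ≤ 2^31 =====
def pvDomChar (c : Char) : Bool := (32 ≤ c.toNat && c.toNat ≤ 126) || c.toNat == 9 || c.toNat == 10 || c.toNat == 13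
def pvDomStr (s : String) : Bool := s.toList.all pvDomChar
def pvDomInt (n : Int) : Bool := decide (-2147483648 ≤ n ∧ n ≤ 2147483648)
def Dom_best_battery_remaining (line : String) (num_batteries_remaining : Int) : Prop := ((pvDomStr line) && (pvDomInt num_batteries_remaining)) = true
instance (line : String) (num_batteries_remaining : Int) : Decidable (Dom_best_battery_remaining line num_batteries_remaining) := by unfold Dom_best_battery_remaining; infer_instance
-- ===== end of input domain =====

-- B replaces A's single tracking scan (running best with an early exit on 9) by two stdlib passes:
-- max over the sliced prefix, then first index of that maximum; objective: simpler.


-- ===== PORT A =====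
-- the for-loop of A over enumerate(substr): state = (idx, best_idx, best_val);
-- int(b) is ported as PySem.Int.ofChars? [c] (.getD 0 is unreachable: Pre_ excludes
-- the non-digit chars on which Python's int raises ValueError)
def bbrLoopA : List Char → Nat → Int → Int → Int
  | [], _, best_idx, _ => best_idx
  | c :: rest, idx, best_idx, best_val =>
    let val := (PySem.Int.ofChars? [c]).getD 0
    if val = 9 then (idx : Int)
    else if best_val < val then bbrLoopA rest (idx + 1) (idx : Int) val
    else bbrLoopA rest (idx + 1) best_idx best_val

def best_battery_remaining (line : String) (num_batteries_remaining : Int) : Int :=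
  bbrLoopA (PySem.Str.slice line none (some (PySem.Str.len line - num_batteries_remaining))).toList 0 (-1) 0

-- ===== PORT B =====
-- Source B: same slice; empty → -1; best = max(substr); '0' → -1; else substr.index(best)
-- (max(substr) = PySem.List.max? with identity key, substr.index = PySem.List.index?;
--  .getD 0 is unreachable: the maximum is an element of the list)
def best_battery_remaining_alt (line : String) (num_batteries_remaining : Int) : Int :=
  match PySem.List.max? (PySem.Str.slice line none (some (PySem.Str.len line - num_batteries_remaining))).toList (fun c => c) with
  | none => -1
  | some best => if best = '0' then -1
      else ((PySem.List.index? (PySem.Str.slice line none (some (PySem.Str.len line - num_batteries_remaining))).toList best).getD 0 : Nat)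

-- ===== PRECONDITION & SPEC =====
-- Pre_ restricts to the natural domain (an all-digit sliced prefix): on a prefix with a
-- non-digit character A raises ValueError from int(b), except that A's early exit still
-- returns the index of a '9' standing before the first non-digit — an artefact of the
-- partial scan on inputs outside the natural domain, which B does not reproduce.
def Pre_best_battery_remaining (line : String) (num_batteries_remaining : Int) : Prop :=
  (PySem.Str.slice line none (some (PySem.Str.len line - num_batteries_remaining))).toList.all Char.isDigit = true
instance (line : String) (num_batteries_remaining : Int) : Decidable (Pre_best_battery_remaining line num_batteries_remaining) := by unfold Pre_best_battery_remaining; infer_instance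

def pvWitness_best_battery_remaining : String × Int := ("90817", 2)

def Spec_best_battery_remaining (line : String) (num_batteries_remaining : Int) (out : Int) : Prop := out = best_battery_remaining_alt line num_batteries_remaining
instance (line : String) (num_batteries_remaining : Int) (out : Int) : Decidable (Spec_best_battery_remaining line num_batteries_remaining out) := by unfold Spec_best_battery_remaining; infer_instance

-- ===== CLAIM (what is proved, stated in full; the proofs are below) =====
def Claim_equal_best_battery_remaining : Prop := ∀ (line : String) (num_batteries_remaining : Int), Dom_best_battery_remaining line num_batteries_remaining → Pre_best_battery_remaining line num_batteries_remaining → Spec_best_battery_remaining line num_batteries_remaining (best_battery_remaining line num_batteries_remaining)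

-- ===== LEMMAS AND PROOFS =====

-- proof-side spec: the maximum character of a list together with the index of its
-- FIRST occurrence (ties keep the earlier element, as both Python max and A's strict '>')
def bbrFM : List Char → Option (Char × Nat)
  | [] => none
  | c :: rest =>
    match bbrFM rest with
    | none => some (c, 0)
    | some (m, i) => if c < m then some (m, i + 1) else some (c, 0)

theorem bbrFM_cons_none (c : Char) (rest : List Char) (hr : bbrFM rest = none) :
    bbrFM (c :: rest) = some (c, 0) := by rw [bbrFM, hr]

theorem bbrFM_cons_some (c : Char) (rest : List Char) (m : Char) (i : Nat)
    (hr : bbrFM rest = some (m, i)) :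
    bbrFM (c :: rest) = if c < m then some (m, i + 1) else some (c, 0) := by rw [bbrFM, hr]

theorem bbr_char_lt_iff (c d : Char) : c < d ↔ c.toNat < d.toNat := by
  rw [Char.lt_def, UInt32.lt_iff_toNat_lt]; rfl

theorem bbr_char_le_iff (c d : Char) : c ≤ d ↔ c.toNat ≤ d.toNat := by
  rw [Char.le_def, UInt32.le_iff_toNat_le]; rfl

theorem bbr_digit_bounds (c : Char) (h : c.isDigit = true) : 48 ≤ c.toNat ∧ c.toNat ≤ 57 := by
  unfold Char.isDigit at h
  rw [Bool.and_eq_true, decide_eq_true_iff, decide_eq_true_iff, ge_iff_le,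
      UInt32.le_iff_toNat_le, UInt32.le_iff_toNat_le] at h
  exact ⟨h.1, h.2⟩

theorem bbr_char_eq_of_toNat_eq (c d : Char) (h : c.toNat = d.toNat) : c = d := by
  apply Char.ext; exact UInt32.toNat_inj.mp h

theorem bbr_int_ofChars_digit (c : Char) (h : c.isDigit = true) :
    PySem.Int.ofChars? [c] = some ((c.toNat : Int) - 48) := by
  obtain ⟨h1, h2⟩ := bbr_digit_bounds c h
  have hc : c = Char.ofNat c.toNat := (Char.ofNat_toNat c).symm
  rw [hc]
  set n := c.toNat with hn
  clear_value n
  interval_cases n <;> decide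

theorem bbrFM_mem (cs : List Char) (m : Char) (i : Nat) (h : bbrFM cs = some (m, i)) : m ∈ cs := by
  induction cs generalizing m i with
  | nil => simp [bbrFM] at h
  | cons c rest ih =>
    cases hr : bbrFM rest with
    | none =>
      rw [bbrFM_cons_none c rest hr] at h
      simp only [Option.some.injEq, Prod.mk.injEq] at h
      rw [← h.1]; exact List.mem_cons_self
    | some p =>
      obtain ⟨m', i'⟩ := p
      rw [bbrFM_cons_some c rest m' i' hr] at h
      split at h <;> simp only [Option.some.injEq, Prod.mk.injEq] at h
      · rw [← h.1]; exact List.mem_cons_of_mem c (ih m' i' hr)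
      · rw [← h.1]; exact List.mem_cons_self

theorem bbrFM_idxOf (cs : List Char) (m : Char) (i : Nat) (h : bbrFM cs = some (m, i)) :
    List.idxOf? m cs = some i := by
  induction cs generalizing m i with
  | nil => simp [bbrFM] at h
  | cons c rest ih =>
    cases hr : bbrFM rest with
    | none =>
      rw [bbrFM_cons_none c rest hr] at h
      simp only [Option.some.injEq, Prod.mk.injEq] at h
      simp [List.idxOf?_cons, h.1, ← h.2]
    | some p =>
      obtain ⟨m', i'⟩ := p
      rw [bbrFM_cons_some c rest m' i' hr] at h
      split at h <;> simp only [Option.some.injEq, Prod.mk.injEq] at h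
      · rename_i hlt
        obtain ⟨he, hi⟩ := h
        subst he
        have hne : (c == m') = false := by
          simp only [beq_eq_false_iff_ne]; exact ne_of_lt hlt
        simp [List.idxOf?_cons, hne, ih m' i' hr, ← hi]
      · simp [List.idxOf?_cons, h.1, ← h.2]

theorem bbr_if_lt_eq_max (x y : Char) : (if x < y then y else x) = max x y := by
  rcases lt_trichotomy x y with h | h | h
  · rw [if_pos h, max_eq_right h.le]
  · subst h; simp
  · rw [if_neg (not_lt_of_gt h), max_eq_left h.le]

-- Python's max keeps the FIRST maximal element: PySem.List.max? with an explicit head,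
-- computed against bbrFM of the tail
theorem bbr_max?_cons (cs : List Char) : ∀ (a : Char),
    PySem.List.max? (a :: cs) (fun c => c) = some ((bbrFM cs).elim a (fun p => if a < p.1 then p.1 else a)) := by
  induction cs with
  | nil => intro a; rfl
  | cons c rest ih =>
    intro a
    have h1 := ih (if a < c then c else a)
    simp only [PySem.List.max?, List.foldl_cons] at h1 ⊢
    rw [← apply_ite some]
    rw [h1]
    cases hr : bbrFM rest with
    | none => simp [bbrFM_cons_none c rest hr, bbr_if_lt_eq_max]
    | some p =>
      obtain ⟨m, i⟩ := p
      rw [bbrFM_cons_some c rest m i hr]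
      simp only [Option.elim_some]
      congr 1
      simp only [bbr_if_lt_eq_max]
      split <;> simp only [Option.elim_some]
      · rename_i hcm
        rw [max_assoc, max_eq_right hcm.le]
      · rename_i hcm
        rw [max_assoc, max_eq_left (le_of_not_gt hcm)]

theorem bbr_max_eq_fm (cs : List Char) :
    PySem.List.max? cs (fun c => c) = (bbrFM cs).map Prod.fst := by
  cases cs with
  | nil => rfl
  | cons a rest =>
    rw [bbr_max?_cons rest a]
    cases hr : bbrFM rest with
    | none => simp [bbrFM_cons_none a rest hr]
    | some p =>
      obtain ⟨m, i⟩ := p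
      rw [bbrFM_cons_some a rest m i hr]
      simp only [Option.elim_some]
      split <;> simp

-- the heart: A's running-best loop returns bi if nothing in cs beats b, else the first
-- index of the maximum of cs, offset by idx
theorem bbr_loopA_eq (cs : List Char) (h : ∀ c ∈ cs, c.isDigit = true) :
    ∀ (idx : Nat) (bi : Int) (b : Char), b.isDigit = true → b ≠ '9' →
    bbrLoopA cs idx bi ((b.toNat : Int) - 48) =
      (bbrFM cs).elim bi (fun p => if p.1 ≤ b then bi else (idx : Int) + (p.2 : Int)) := by
  induction cs with
  | nil => intro idx bi b _ _; simp [bbrLoopA, bbrFM]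
  | cons c rest ih =>
    intro idx bi b hb hb9
    have hc : c.isDigit = true := h c (List.mem_cons_self)
    have hrest : ∀ x ∈ rest, x.isDigit = true := fun x hx => h x (List.mem_cons_of_mem c hx)
    obtain ⟨hb1, hb2⟩ := bbr_digit_bounds b hb
    obtain ⟨hc1, hc2⟩ := bbr_digit_bounds c hc
    have hb9' : b.toNat ≠ 57 := fun he => hb9 (bbr_char_eq_of_toNat_eq b '9' (by simpa using he))
    simp only [bbrLoopA, bbr_int_ofChars_digit c hc, Option.getD_some]
    by_cases h9 : (c.toNat : Int) - 48 = 9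
    · -- c = '9': early return idx; '9' is the maximum of c :: rest and its first index is 0
      have hc9n : c.toNat = 57 := by omega
      rw [if_pos h9]
      cases hr : bbrFM rest with
      | none =>
        rw [bbrFM_cons_none c rest hr]
        simp only [Option.elim_some]
        rw [if_neg (by rw [bbr_char_le_iff]; simp; omega)]
        simp
      | some p =>
        obtain ⟨m, i⟩ := p
        have hm9 : ¬ c < m := by
          rw [bbr_char_lt_iff, hc9n]
          exact not_lt_of_ge (bbr_digit_bounds m (hrest m (bbrFM_mem rest m i hr))).2
        rw [bbrFM_cons_some c rest m i hr, if_neg hm9]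
        simp only [Option.elim_some]
        rw [if_neg (by rw [bbr_char_le_iff]; simp; omega)]
        simp
    · rw [if_neg h9]
      by_cases hgt : (b.toNat : Int) - 48 < (c.toNat : Int) - 48
      · -- c beats the running best: recurse with best pair (idx, c)
        have hc9' : c ≠ '9' := fun he => h9 (by rw [he]; decide)
        have hbc : b < c := by rw [bbr_char_lt_iff]; omega
        rw [if_pos hgt, ih hrest (idx + 1) (idx : Int) c hc hc9']
        cases hr : bbrFM rest with
        | none =>
          rw [bbrFM_cons_none c rest hr]
          simp only [Option.elim_none, Option.elim_some]
          rw [if_neg (not_le_of_gt hbc)]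
          simp
        | some p =>
          obtain ⟨m, i⟩ := p
          rw [bbrFM_cons_some c rest m i hr]
          by_cases hcm : c < m
          · rw [if_pos hcm]
            simp only [Option.elim_some]
            rw [if_neg (not_le_of_gt hcm), if_neg (not_le_of_gt (lt_trans hbc hcm))]
            push_cast; ring
          · rw [if_neg hcm]
            simp only [Option.elim_some]
            rw [if_pos (le_of_not_gt hcm), if_neg (not_le_of_gt hbc)]
            simp
      · -- c does not beat the running best: state unchanged
        have hcb : c ≤ b := by rw [bbr_char_le_iff]; omega
        rw [if_neg hgt, ih hrest (idx + 1) bi b hb hb9]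
        cases hr : bbrFM rest with
        | none =>
          rw [bbrFM_cons_none c rest hr]
          simp only [Option.elim_none, Option.elim_some]
          rw [if_pos hcb]
        | some p =>
          obtain ⟨m, i⟩ := p
          rw [bbrFM_cons_some c rest m i hr]
          by_cases hcm : c < m
          · rw [if_pos hcm]
            simp only [Option.elim_some]
            by_cases hmb : m ≤ b
            · rw [if_pos hmb, if_pos hmb]
            · rw [if_neg hmb, if_neg hmb]; push_cast; ring
          · rw [if_neg hcm]
            simp only [Option.elim_some]
            rw [if_pos hcb, if_pos (le_trans (le_of_not_gt hcm) hcb)]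

-- ===== VERDICT (by name: the statement is the Claim_ definition above) =====
theorem best_battery_remaining_spec : Claim_equal_best_battery_remaining := by
  intro line n _ hpre
  unfold Spec_best_battery_remaining best_battery_remaining best_battery_remaining_alt
  unfold Pre_best_battery_remaining at hpre
  set cs := (PySem.Str.slice line none (some (PySem.Str.len line - n))).toList with hcs
  rw [List.all_eq_true] at hpre
  have h0 : ((('0' : Char).toNat : Int) - 48) = 0 := by decide
  rw [← h0, bbr_loopA_eq cs hpre 0 (-1) '0' (by decide) (by decide)]
  rw [bbr_max_eq_fm cs]
  cases hr : bbrFM cs with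
  | none => simp
  | some p =>
    obtain ⟨m, i⟩ := p
    have hm : m.isDigit = true := hpre m (bbrFM_mem cs m i hr)
    obtain ⟨hm1, hm2⟩ := bbr_digit_bounds m hm
    have hiff : m ≤ '0' ↔ m = '0' := by
      constructor
      · intro hle
        exact bbr_char_eq_of_toNat_eq m '0' (by rw [bbr_char_le_iff] at hle; simp at hle ⊢; omega)
      · intro he; rw [he]
    simp only [Option.map_some, Option.elim_some]
    by_cases hm0 : m = '0'
    · rw [if_pos (hiff.mpr hm0), if_pos hm0]
    · rw [if_neg (fun hle => hm0 (hiff.mp hle)), if_neg hm0]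
      unfold PySem.List.index?
      rw [bbrFM_idxOf cs m i hr]
      simp
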